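-- pv_equiv track=rewrite | github.com/metecoban/Py-Projects | Word-frequency-bot-in-news-website/word-frequency-finder-in-sozcu.com.tr.py | category_control
-- ===== SOURCE A (Python) =====
-- def category_control(demo_dates, demo_categories):
--     general_list = []
--     while 0 < len(demo_dates):
--         tempo = demo_dates[0]
--         date_count = demo_dates.count(tempo)
--         mini_list = []
--         for i in range(date_count):
--             date_index = demo_dates.index(tempo)
--             mini_list.append(demo_categories[date_index])
--             demo_dates.pop(date_index)
--             demo_categories.pop(date_index)
--         mini_dict = {tempo: mini_list}
--         general_list.append(mini_dict)
--     return general_list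
-- ===== SOURCE B (Python) =====
-- def category_control(demo_dates, demo_categories):
--     groups = {}
--     for date, cat in zip(demo_dates, demo_categories):
--         groups[date] = groups.get(date, []) + [cat]
--     return [{date: cats} for date, cats in groups.items()]
-- ===== Notes on version B (the rewrite author's own statement) =====
-- stated objective: faster
-- what changed: Replaces A's destructive quadratic loop (repeated count/index/pop on the lists) by one pass over zip(dates, categories) grouping into an insertion-ordered dict, then emitting one singleton dict per key; B also leaves the argument lists unmutated (A empties them in place).
import Mathlib
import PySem

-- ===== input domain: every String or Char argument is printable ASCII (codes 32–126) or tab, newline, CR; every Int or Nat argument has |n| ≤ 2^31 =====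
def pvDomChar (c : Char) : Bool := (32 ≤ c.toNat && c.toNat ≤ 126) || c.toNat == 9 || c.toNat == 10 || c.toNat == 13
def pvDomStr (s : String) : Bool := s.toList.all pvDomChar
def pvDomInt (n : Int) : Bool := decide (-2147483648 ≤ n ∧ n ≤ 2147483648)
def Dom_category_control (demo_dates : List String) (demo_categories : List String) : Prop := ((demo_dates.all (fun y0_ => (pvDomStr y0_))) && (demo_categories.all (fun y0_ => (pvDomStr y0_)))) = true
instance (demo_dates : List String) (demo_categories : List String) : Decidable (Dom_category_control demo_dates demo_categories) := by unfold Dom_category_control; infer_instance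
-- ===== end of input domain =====

-- B groups by date in one pass over zip(dates, categories) via an insertion-ordered dict instead of
-- A's destructive count/index/pop loop; equivalence is about the RETURN value only (A empties its
-- argument lists in place, B leaves them untouched).

-- ===== PORT A =====
-- inner 'for i in range(date_count)' loop; state = (demo_dates, demo_categories, mini_list);
-- none = the Python raised (ValueError from .index — unreachable — or IndexError from demo_categories[date_index]);
-- list.pop at a valid index is eraseIdx (the popped value is discarded by A)
def pvInnerA : Nat → String → List String → List String → List String →
    Option (List String × List String × List String)
  | 0, _, dates, cats, mini => some (dates, cats, mini)
  | n + 1, tempo, dates, cats, mini =>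
    match PySem.List.index? dates tempo with
    | none => none
    | some idx =>
      match PySem.List.pyGet? cats (idx : Int) with
      | none => none
      | some c => pvInnerA n tempo (dates.eraseIdx idx) (cats.eraseIdx idx) (mini ++ [c])

-- outer 'while 0 < len(demo_dates)' loop, fuel = initial length (each pass pops at least one date);
-- on the none (raise) branch the list accumulated so far is returned — those inputs are excluded by Pre_
def pvOuterA : Nat → List String → List String → List (List (String × List String)) →
    List (List (String × List String))
  | 0, _, _, gen => gen
  | fuel + 1, dates, cats, gen =>
    match dates with
    | [] => gen
    | tempo :: _ =>
      match pvInnerA (PySem.List.count dates tempo) tempo dates cats [] with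
      | none => gen
      | some (dates', cats', mini) => pvOuterA fuel dates' cats' (gen ++ [[(tempo, mini)]])

def category_control (demo_dates : List String) (demo_categories : List String) : List (List (String × List String)) :=
  pvOuterA demo_dates.length demo_dates demo_categories []

-- ===== PORT B =====
def category_control_alt (demo_dates : List String) (demo_categories : List String) : List (List (String × List String)) :=
  let groups : PySem.Dict String (List String) :=
    (demo_dates.zip demo_categories).foldl
      (fun g p => g.modify p.1 [] (· ++ [p.2])) PySem.Dict.empty
  groups.items.map (fun p => [(p.1, p.2)])

-- ===== PRECONDITION & SPEC =====
-- A pops one category per date and indexes demo_categories at a position taken from demo_dates: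
-- when the categories list is shorter than the dates list it raises IndexError, so those inputs are excluded.
def Pre_category_control (demo_dates : List String) (demo_categories : List String) : Prop :=
  demo_dates.length ≤ demo_categories.length
instance (demo_dates : List String) (demo_categories : List String) : Decidable (Pre_category_control demo_dates demo_categories) := by unfold Pre_category_control; infer_instance

def pvWitness_category_control : List String × List String :=
  (["a", "b", "a"], ["x", "y", "z"])

def Spec_category_control (demo_dates : List String) (demo_categories : List String) (out : List (List (String × List String))) : Prop := out = category_control_alt demo_dates demo_categories
instance (demo_dates : List String) (demo_categories : List String) (out : List (List (String × List String))) : Decidable (Spec_category_control demo_dates demo_categories out) := by unfold Spec_category_control; infer_instance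

-- ===== CLAIM (what is proved, stated in full; the proofs are below) =====
def Claim_equal_category_control : Prop := ∀ (demo_dates : List String) (demo_categories : List String), Dom_category_control demo_dates demo_categories → Pre_category_control demo_dates demo_categories → Spec_category_control demo_dates demo_categories (category_control demo_dates demo_categories)

-- ===== LEMMAS AND PROOFS =====
-- Both ports are reduced to one closed form: one entry per distinct date (first-occurrence order),
-- carrying the categories zipped with that date, in order.

lemma pvInnerA_cons (n : Nat) (tempo x c : String) (hx : x ≠ tempo) :
    ∀ (dates cats mini : List String),
    pvInnerA n tempo (x :: dates) (c :: cats) mini =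
      (pvInnerA n tempo dates cats mini).map (fun t => (x :: t.1, c :: t.2.1, t.2.2)) := by
  induction n with
  | zero => intro dates cats mini; rfl
  | succ n ih =>
    intro dates cats mini
    simp only [pvInnerA, PySem.List.index?_cons_of_ne dates hx]
    cases hidx : PySem.List.index? dates tempo with
    | none => simp
    | some idx =>
      simp only [Option.map_some]
      have hg : PySem.List.pyGet? (c :: cats) ((idx + 1 : Nat) : Int) = PySem.List.pyGet? cats (idx : Int) := by
        simp
      rw [hg]
      cases hgv : PySem.List.pyGet? cats (idx : Int) with
      | none => rfl
      | some cv =>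
        simp only [List.eraseIdx_cons_succ]
        exact ih (dates.eraseIdx idx) (cats.eraseIdx idx) (mini ++ [cv])

lemma pvInnerA_spec (tempo : String) :
    ∀ (dates cats mini : List String), dates.length ≤ cats.length →
    pvInnerA (PySem.List.count dates tempo) tempo dates cats mini =
      some (dates.filter (fun d => !(d == tempo)),
            ((dates.zip cats).filter (fun p => !(p.1 == tempo))).map (·.2) ++ cats.drop dates.length,
            mini ++ ((dates.zip cats).filter (fun p => p.1 == tempo)).map (·.2)) := by
  intro dates
  induction dates with
  | nil => intro cats mini _; simp [pvInnerA, PySem.List.count]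
  | cons a rest ih =>
    intro cats mini hlen
    cases cats with
    | nil => simp at hlen
    | cons c crest =>
      have hlen' : rest.length ≤ crest.length := by simpa using hlen
      by_cases ha : a = tempo
      · subst ha
        have hc : PySem.List.count (a :: rest) a = PySem.List.count rest a + 1 := by
          simp [PySem.List.count_eq]
        rw [hc]
        simp only [pvInnerA, PySem.List.index?_cons_self]
        have hg0 : PySem.List.pyGet? (c :: crest) ((0 : Nat) : Int) = some c := by
          simp
        rw [hg0]
        simp only [List.eraseIdx_cons_zero]
        rw [ih crest (mini ++ [c]) hlen']
        simp
      · have hc : PySem.List.count (a :: rest) tempo = PySem.List.count rest tempo := by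
          simp [PySem.List.count_eq, ha]
        rw [hc, pvInnerA_cons _ _ _ _ ha, ih crest mini hlen']
        simp [ha]

def pvGroups (dates cats : List String) : List (List (String × List String)) :=
  (PySem.Set.ofList dates).map
    (fun k => [(k, ((dates.zip cats).filter (fun p => p.1 == k)).map (·.2))])

lemma pvOfList_filter (p : String → Bool) (l : List String) :
    PySem.Set.ofList (l.filter p) = (PySem.Set.ofList l).filter p := by
  induction l with
  | nil => rfl
  | cons x xs ih =>
    rw [PySem.Set.ofList_cons]
    by_cases hp : p x = true
    · rw [List.filter_cons_of_pos hp, PySem.Set.ofList_cons, ih,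
        List.filter_cons_of_pos hp]
      simp only [PySem.Set.discard, List.filter_filter]
      congr 1
      exact List.filter_congr (fun a _ => Bool.and_comm _ _)
    · rw [List.filter_cons_of_neg hp, ih, List.filter_cons_of_neg hp]
      simp only [PySem.Set.discard, List.filter_filter]
      apply List.filter_congr
      intro y _
      by_cases hy : y = x
      · subst hy; simp [hp]
      · simp [hy]

lemma pvGroups_truncate (dates cs ex : List String) (h : dates.length = cs.length) :
    pvGroups dates (cs ++ ex) = pvGroups dates cs := by
  unfold pvGroups
  rw [show dates.zip (cs ++ ex) = dates.zip cs from by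
    have := List.zip_append (l₁ := dates) (r₁ := ([] : List String)) (l₂ := cs) (r₂ := ex) h
    simpa using this]

lemma pvGroups_cons (d c : String) (dates cats : List String) (hlen : dates.length ≤ cats.length) :
    pvGroups (d :: dates) (c :: cats) =
      [(d, c :: ((dates.zip cats).filter (fun p => p.1 == d)).map (·.2))] ::
        pvGroups (dates.filter (fun x => !(x == d)))
                 (((dates.zip cats).filter (fun p => !(p.1 == d))).map (·.2)) := by
  have hfst : ((dates.zip cats).filter (fun p => !(p.1 == d))).map (·.1) =
      dates.filter (fun x => !(x == d)) := by
    rw [show List.filter (fun p => !p.1 == d) (dates.zip cats)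
        = List.filter ((fun x => !(x == d)) ∘ Prod.fst) (dates.zip cats) from rfl,
      ← List.filter_map, List.map_fst_zip hlen]
  have hzip : (dates.filter (fun x => !(x == d))).zip
        (((dates.zip cats).filter (fun p => !(p.1 == d))).map (·.2)) =
      (dates.zip cats).filter (fun p => !(p.1 == d)) := by
    rw [← hfst, List.zip_map', List.map_id']
  unfold pvGroups
  rw [hzip, PySem.Set.ofList_cons]
  simp only [List.map_cons, List.zip_cons_cons]
  congr 1
  · simp
  · rw [show (PySem.Set.ofList dates).discard d
        = PySem.Set.ofList (dates.filter (fun x => !(x == d))) from by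
      rw [pvOfList_filter]; rfl]
    apply List.map_congr_left
    intro k hk
    have hkd : k ≠ d := by
      have hk' : k ∈ PySem.Set.ofList (dates.filter (fun x => !(x == d))) := hk
      have := (PySem.Set.mem_ofList _ _).mp hk'
      have := List.of_mem_filter this
      simpa using this
    have hff : List.filter (fun p => p.1 == k) (List.filter (fun p => !p.1 == d) (dates.zip cats))
        = List.filter (fun p => p.1 == k) (dates.zip cats) := by
      rw [List.filter_filter]
      apply List.filter_congr
      intro a _
      by_cases hak : a.1 = k
      · simp [hak, hkd]
      · simp [hak]
    rw [List.filter_cons_of_neg (by simp [Ne.symm hkd]), hff]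

lemma pvOuterA_spec : ∀ (fuel : Nat) (dates cats : List String)
    (gen : List (List (String × List String))),
    dates.length ≤ fuel → dates.length ≤ cats.length →
    pvOuterA fuel dates cats gen = gen ++ pvGroups dates cats := by
  intro fuel
  induction fuel with
  | zero =>
    intro dates cats gen hf _
    have : dates = [] := List.eq_nil_of_length_eq_zero (Nat.le_zero.mp hf)
    subst this
    simp [pvOuterA, pvGroups, PySem.Set.ofList]
  | succ fuel ih =>
    intro dates cats gen hf hlen
    cases dates with
    | nil => simp [pvOuterA, pvGroups, PySem.Set.ofList]
    | cons d rest =>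
      cases cats with
      | nil => simp at hlen
      | cons c crest =>
        have hlen' : rest.length ≤ crest.length := by simpa using hlen
        simp only [pvOuterA]
        rw [pvInnerA_spec d (d :: rest) (c :: crest) [] hlen]
        simp only [List.filter_cons, beq_self_eq_true, Bool.not_true, List.zip_cons_cons,
          Bool.false_eq_true, reduceIte, List.length_cons, List.drop_succ_cons,
          List.nil_append, List.map_cons]
        have hfst : ((rest.zip crest).filter (fun p => !(p.1 == d))).map (·.1) =
            rest.filter (fun x => !(x == d)) := by
          rw [show List.filter (fun p => !p.1 == d) (rest.zip crest)
              = List.filter ((fun x => !(x == d)) ∘ Prod.fst) (rest.zip crest) from rfl,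
            ← List.filter_map, List.map_fst_zip hlen']
        have h1 : (rest.filter (fun x => !(x == d))).length ≤ rest.length :=
          List.length_filter_le _ _
        have h2 : (((rest.zip crest).filter (fun p => !(p.1 == d))).map (·.2)).length
            = (rest.filter (fun x => !(x == d))).length := by
          rw [← hfst, List.length_map, List.length_map]
        have hf' : rest.length ≤ fuel := by
          simp only [List.length_cons] at hf; omega
        rw [ih (rest.filter (fun x => !(x == d)))
              (((rest.zip crest).filter (fun p => !(p.1 == d))).map (·.2) ++ crest.drop rest.length)
              (gen ++ [[(d, c :: ((rest.zip crest).filter (fun p => p.1 == d)).map (·.2))]])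
              (by omega)
              (by rw [List.length_append]; omega)]
        rw [pvGroups_truncate _ _ _ h2.symm]
        rw [pvGroups_cons d c rest crest hlen']
        simp

lemma category_control_alt_spec (dates cats : List String) (hlen : dates.length ≤ cats.length) :
    category_control_alt dates cats = pvGroups dates cats := by
  unfold category_control_alt
  show ((dates.zip cats).foldl (fun g p => g.modify p.1 [] (· ++ [p.2]))
      PySem.Dict.empty).items.map (fun p => [(p.1, p.2)]) = pvGroups dates cats
  have hkeys : ((dates.zip cats).foldl
      (fun g p => g.modify p.1 [] (· ++ [p.2])) PySem.Dict.empty).keys =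
      PySem.Set.ofList dates := by
    rw [PySem.Dict.keys_foldl_modify_key (dates.zip cats) Prod.fst []
        (fun _ p => (· ++ [p.2])) PySem.Dict.empty]
    rw [PySem.Dict.keys_empty, PySem.Set.update_nil_left, List.map_fst_zip hlen]
  have hnodup : ((dates.zip cats).foldl
      (fun g p => g.modify p.1 [] (· ++ [p.2])) PySem.Dict.empty).keys.Nodup := by
    exact PySem.Dict.nodup_keys_foldl_modify_key (dates.zip cats) Prod.fst []
      (fun _ p => (· ++ [p.2])) PySem.Dict.empty PySem.Dict.nodup_keys_empty
  rw [PySem.Dict.items_eq_map_keys _ hnodup [], hkeys, List.map_map]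
  unfold pvGroups
  apply List.map_congr_left
  intro k _
  simp only [Function.comp]
  rw [PySem.Dict.getD_foldl_modify_append (dates.zip cats) PySem.Dict.empty k,
    PySem.Dict.getD_empty]
  simp

-- ===== VERDICT (by name: the statement is the Claim_ definition above) =====
theorem category_control_spec : Claim_equal_category_control := by
  intro dates cats _ hpre
  unfold Spec_category_control
  rw [category_control, pvOuterA_spec dates.length dates cats [] le_rfl hpre,
    category_control_alt_spec dates cats hpre, List.nil_append]
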